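-- pv_equiv track=rewrite | github.com/nahidbau/MicroLab-Nexus | script.py | clean_sequence
-- ===== SOURCE A (Python) =====
-- def clean_sequence(sequence: str) -> str:
--     """Clean and validate nucleotide sequence"""
--     # Remove whitespace and numbers
--     sequence = ''.join([c for c in sequence.upper() if c in 'ATCGNRYSWKMBDHVN'])
--
--     # Replace ambiguous bases with N
--     ambiguous = {'R': 'N', 'Y': 'N', 'S': 'N', 'W': 'N',
--                  'K': 'N', 'M': 'N', 'B': 'N', 'D': 'N',
--                  'H': 'N', 'V': 'N'}
--
--     for amb, rep in ambiguous.items():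
--         sequence = sequence.replace(amb, rep)
--
--     return sequence
-- ===== SOURCE B (Python) =====
-- # Single table-driven pass: one mapping dict (kept bases -> themselves, ambiguous codes -> 'N'),
-- # unknown characters map to '' and are dropped in the same scan.
-- _MAPPING = {'A': 'A', 'T': 'T', 'C': 'C', 'G': 'G', 'N': 'N',
--             'R': 'N', 'Y': 'N', 'S': 'N', 'W': 'N', 'K': 'N',
--             'M': 'N', 'B': 'N', 'D': 'N', 'H': 'N', 'V': 'N'}
--
--
-- def clean_sequence(sequence: str) -> str:
--     return ''.join(_MAPPING.get(c, '') for c in sequence.upper())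
-- ===== Notes on version B (the rewrite author's own statement) =====
-- stated objective: simpler
-- what changed: Replaces the filter pass plus ten successive str.replace scans with one mapping table built once (kept bases map to themselves, ambiguous codes to N) and a single pass that looks each character up in the table, dropping unknown characters in the same scan.
import Mathlib
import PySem

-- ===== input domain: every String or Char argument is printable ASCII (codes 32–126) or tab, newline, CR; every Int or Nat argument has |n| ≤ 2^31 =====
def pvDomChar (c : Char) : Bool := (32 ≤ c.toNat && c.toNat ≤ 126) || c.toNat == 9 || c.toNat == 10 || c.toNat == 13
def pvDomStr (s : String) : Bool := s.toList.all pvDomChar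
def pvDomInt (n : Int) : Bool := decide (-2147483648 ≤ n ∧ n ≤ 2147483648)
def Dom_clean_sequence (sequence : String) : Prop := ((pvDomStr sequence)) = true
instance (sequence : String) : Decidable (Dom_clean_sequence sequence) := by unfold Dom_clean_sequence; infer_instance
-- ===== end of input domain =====

-- B: one table-driven pass (mapping dict built once) instead of a filter pass plus ten str.replace scans — simpler.


-- ===== PORT A =====
def validCharsA : List Char :=  -- the characters of 'ATCGNRYSWKMBDHVN' (N appears twice, as in the source)
  ['A','T','C','G','N','R','Y','S','W','K','M','B','D','H','V','N']

-- Python dict items, in insertion order, as iterated by the for-loop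
def ambiguousA : List (Char × Char) :=
  [('R','N'), ('Y','N'), ('S','N'), ('W','N'), ('K','N'),
   ('M','N'), ('B','N'), ('D','N'), ('H','N'), ('V','N')]

def clean_sequence (sequence : String) : String :=
  -- 'c in "ATCGNRYSWKMBDHVN"' for the single character c is membership (exact)
  let cs := ((PySem.Str.upper sequence).toList.filter (fun c => validCharsA.contains c))
  -- for amb, rep in ambiguous.items(): sequence = sequence.replace(amb, rep)
  let cs := ambiguousA.foldl (fun acc p => PySem.Chars.replace acc [p.1] [p.2]) cs
  String.mk cs

-- ===== PORT B =====
def mappingB : PySem.Dict Char (List Char) :=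
  PySem.Dict.mk [('A',['A']), ('T',['T']), ('C',['C']), ('G',['G']), ('N',['N']),
                 ('R',['N']), ('Y',['N']), ('S',['N']), ('W',['N']), ('K',['N']),
                 ('M',['N']), ('B',['N']), ('D',['N']), ('H',['N']), ('V',['N'])]

def clean_sequence_alt (sequence : String) : String :=
  -- ''.join(_MAPPING.get(c, '') for c in sequence.upper())
  String.mk ((PySem.Str.upper sequence).toList.flatMap (fun c => PySem.Dict.getD mappingB c []))

-- ===== PRECONDITION & SPEC =====
def Spec_clean_sequence (sequence : String) (out : String) : Prop := out = clean_sequence_alt sequence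
instance (sequence : String) (out : String) : Decidable (Spec_clean_sequence sequence out) := by unfold Spec_clean_sequence; infer_instance

-- ===== CLAIM (what is proved, stated in full; the proofs are below) =====
def Claim_equal_clean_sequence : Prop := ∀ (sequence : String), Dom_clean_sequence sequence → Spec_clean_sequence sequence (clean_sequence sequence)

-- ===== LEMMAS AND PROOFS =====

-- replace with a single-character pattern is a per-character map
lemma replace_go_singleton (a b : Char) (l : List Char) :
    ∀ (fuel : Nat) (acc : List Char), l.length ≤ fuel →
      PySem.Chars.replace.go [a] [b] fuel l acc =
        acc.reverse ++ l.map (fun c => if c = a then b else c) := by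
  induction l with
  | nil =>
      intro fuel acc _
      cases fuel <;> simp [PySem.Chars.replace.go]
  | cons c t ih =>
      intro fuel acc hle
      cases fuel with
      | zero => simp at hle
      | succ n =>
        rw [PySem.Chars.replace.go]
        by_cases hca : c = a
        · subst hca
          rw [if_pos (by simp [List.isPrefixOf])]
          simp only [List.length_cons, List.length_nil, Nat.zero_add, List.drop_succ_cons,
            List.drop_zero]
          rw [ih n ([b].reverse ++ acc) (Nat.le_of_succ_le_succ hle)]
          simp
        · rw [if_neg (by simp [List.isPrefixOf, Ne.symm hca])]
          rw [ih n (c :: acc) (Nat.le_of_succ_le_succ hle)]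
          simp [hca]

lemma replace_singleton (a b : Char) (l : List Char) :
    PySem.Chars.replace l [a] [b] = l.map (fun c => if c = a then b else c) := by
  rw [PySem.Chars.replace]
  simpa using replace_go_singleton a b l l.length [] (le_refl _)

-- filter-then-map equals a single flatMap pass
lemma filter_map_eq_flatMap (p : Char → Bool) (h : Char → Char) (l : List Char) :
    (l.filter p).map h = l.flatMap (fun c => if p c then [h c] else []) := by
  induction l with
  | nil => rfl
  | cons c t ih => by_cases hc : p c <;> simp [hc, ih]

-- what A computes per kept character
def repA (c : Char) : Char :=
  ambiguousA.foldl (fun x p => if x = p.1 then p.2 else x) c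

-- the per-character table lookup of B agrees with A's filter + replacements
lemma pointwise (c : Char) :
    (if validCharsA.contains c = true then [repA c] else []) = PySem.Dict.getD mappingB c [] := by
  by_cases h1 : c = 'A'; · subst h1; decide
  by_cases h2 : c = 'T'; · subst h2; decide
  by_cases h3 : c = 'C'; · subst h3; decide
  by_cases h4 : c = 'G'; · subst h4; decide
  by_cases h5 : c = 'N'; · subst h5; decide
  by_cases h6 : c = 'R'; · subst h6; decide
  by_cases h7 : c = 'Y'; · subst h7; decide
  by_cases h8 : c = 'S'; · subst h8; decide
  by_cases h9 : c = 'W'; · subst h9; decide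
  by_cases h10 : c = 'K'; · subst h10; decide
  by_cases h11 : c = 'M'; · subst h11; decide
  by_cases h12 : c = 'B'; · subst h12; decide
  by_cases h13 : c = 'D'; · subst h13; decide
  by_cases h14 : c = 'H'; · subst h14; decide
  by_cases h15 : c = 'V'; · subst h15; decide
  have hmem : validCharsA.contains c = false := by
    simp [validCharsA, List.contains_eq_mem, h1, h2, h3, h4, h5, h6, h7, h8, h9, h10,
      h11, h12, h13, h14, h15]
  have hget : PySem.Dict.getD mappingB c [] = [] := by
    have b1 : ('A' == c) = false := by simp [Ne.symm h1]
    have b2 : ('T' == c) = false := by simp [Ne.symm h2]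
    have b3 : ('C' == c) = false := by simp [Ne.symm h3]
    have b4 : ('G' == c) = false := by simp [Ne.symm h4]
    have b5 : ('N' == c) = false := by simp [Ne.symm h5]
    have b6 : ('R' == c) = false := by simp [Ne.symm h6]
    have b7 : ('Y' == c) = false := by simp [Ne.symm h7]
    have b8 : ('S' == c) = false := by simp [Ne.symm h8]
    have b9 : ('W' == c) = false := by simp [Ne.symm h9]
    have b10 : ('K' == c) = false := by simp [Ne.symm h10]
    have b11 : ('M' == c) = false := by simp [Ne.symm h11]
    have b12 : ('B' == c) = false := by simp [Ne.symm h12]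
    have b13 : ('D' == c) = false := by simp [Ne.symm h13]
    have b14 : ('H' == c) = false := by simp [Ne.symm h14]
    have b15 : ('V' == c) = false := by simp [Ne.symm h15]
    simp [mappingB, PySem.Dict.getD, PySem.Dict.get?, List.find?,
      b1, b2, b3, b4, b5, b6, b7, b8, b9, b10, b11, b12, b13, b14, b15]
  rw [hmem, hget]
  simp

-- ===== VERDICT (by name: the statement is the Claim_ definition above) =====
-- a left fold of per-character maps is one map of the folded step
lemma foldl_map_comm (ps : List (Char × Char)) (l : List Char) :
    ps.foldl (fun acc p => acc.map (fun c => if c = p.1 then p.2 else c)) l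
      = l.map (fun c => ps.foldl (fun x p => if x = p.1 then p.2 else x) c) := by
  induction ps generalizing l with
  | nil => simp
  | cons p ps ih => simp [ih, Function.comp_def]

-- the whole computation, at the character-list level
lemma main_list (cs : List Char) :
    ambiguousA.foldl (fun acc p => PySem.Chars.replace acc [p.1] [p.2])
        (cs.filter (fun c => validCharsA.contains c))
      = cs.flatMap (fun c => PySem.Dict.getD mappingB c []) := by
  simp only [replace_singleton]
  rw [foldl_map_comm]
  rw [show (fun c => ambiguousA.foldl (fun x p => if x = p.1 then p.2 else x) c) = repA
    from rfl]
  rw [filter_map_eq_flatMap]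
  exact List.flatMap_congr (fun c _ => pointwise c)

-- ===== VERDICT (by name: the statement is the Claim_ definition above) =====
theorem clean_sequence_spec : Claim_equal_clean_sequence := by
  intro sequence _
  exact congrArg String.mk (main_list (PySem.Str.upper sequence).toList)
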